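-- pv_equiv track=rewrite | github.com/HarikNguyen/intro_AI_pacman_prj | app/utils/read_map.py | is_map_valid
-- ===== SOURCE A (Python) =====
-- def is_map_valid(map):
--     # all rows must have the same length
--     for row in range(len(map)):
--         if len(map[0]) != len(map[row]):
--             return False
--     # map doesn't have any invalid value (!= 0, 1, 2, 3)
--     for row in range(len(map)):
--         for col in range(len(map[row])):
--             if map[row][col] not in [0, 1, 2, 3]:
--                 return False
--     return True
-- ===== SOURCE B (Python) =====
-- def is_map_valid(map):
--     # Single fused pass: chain adjacent row lengths (each row compared to its
--     # predecessor, not to map[0]) and range-test cells (0 <= c <= 3) as we go.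
--     prev = None
--     for row in map:
--         if prev is not None and len(row) != len(prev):
--             return False
--         if any(not (0 <= c <= 3) for c in row):
--             return False
--         prev = row
--     return True
-- ===== Notes on version B (the rewrite author's own statement) =====
-- stated objective: alternative
-- what changed: One fused pass that chains each row's length against its predecessor (transitivity gives uniform width) and range-tests cells with 0 <= c <= 3, instead of A's two staged index loops comparing every row to map[0] and testing membership in [0,1,2,3].
import Mathlib
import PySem

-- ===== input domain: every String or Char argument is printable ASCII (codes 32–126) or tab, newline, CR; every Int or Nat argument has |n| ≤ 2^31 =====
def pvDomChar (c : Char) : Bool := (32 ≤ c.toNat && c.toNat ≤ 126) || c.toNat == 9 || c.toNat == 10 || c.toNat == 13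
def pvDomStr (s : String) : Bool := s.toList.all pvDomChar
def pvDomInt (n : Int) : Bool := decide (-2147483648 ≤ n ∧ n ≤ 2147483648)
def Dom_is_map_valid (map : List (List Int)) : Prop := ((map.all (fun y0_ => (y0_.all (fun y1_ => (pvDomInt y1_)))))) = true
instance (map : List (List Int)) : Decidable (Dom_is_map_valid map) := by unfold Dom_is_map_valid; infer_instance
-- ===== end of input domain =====

-- B makes one fused pass chaining each row's length against its predecessor and
-- range-testing cells (0 ≤ c ≤ 3), instead of A's two staged index loops against map[0];
-- objective: alternative.

-- ===== PORT A =====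
-- index loops ported over pyRange/pyGetD; every index the loops produce is in range, so the default is never read
def is_map_valid (map : List (List Int)) : Bool :=
  ((PySem.List.pyRange 0 (map.length : Int) 1).all (fun row =>
      decide ((PySem.List.pyGetD map 0 []).length = (PySem.List.pyGetD map row []).length)))
  &&
  ((PySem.List.pyRange 0 (map.length : Int) 1).all (fun row =>
      (PySem.List.pyRange 0 ((PySem.List.pyGetD map row []).length : Int) 1).all (fun col =>
        decide (PySem.List.pyGetD (PySem.List.pyGetD map row []) col 0 ∈ ([0, 1, 2, 3] : List Int)))))

-- ===== PORT B =====
-- the cell test 'not (0 <= c <= 3)' of B's any(...), as a named helper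
def pvBadCell (c : Int) : Bool := !(decide (0 ≤ c ∧ c ≤ 3))

-- the for-loop with early returns and the 'prev' accumulator, as structural recursion over the rows
def pvGoB (rows : List (List Int)) (prev : Option (List Int)) : Bool :=
  match rows with
  | [] => true
  | row :: rest =>
    if prev.elim false (fun p => row.length ≠ p.length) then false
    else if row.any pvBadCell then false
    else pvGoB rest (some row)

def is_map_valid_alt (map : List (List Int)) : Bool := pvGoB map none

-- ===== PRECONDITION & SPEC =====
def Spec_is_map_valid (map : List (List Int)) (out : Bool) : Prop := out = is_map_valid_alt map
instance (map : List (List Int)) (out : Bool) : Decidable (Spec_is_map_valid map out) := by unfold Spec_is_map_valid; infer_instance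

-- ===== CLAIM (what is proved, stated in full; the proofs are below) =====
def Claim_equal_is_map_valid : Prop := ∀ (map : List (List Int)), Dom_is_map_valid map → Spec_is_map_valid map (is_map_valid map)

-- ===== LEMMAS AND PROOFS =====

-- 'for i in range(len(xs)): … xs[i] …' as an all-loop is xs.all
lemma all_pyRange_pyGetD {α : Type} (xs : List α) (d : α) (g : α → Bool) :
    (PySem.List.pyRange 0 (xs.length : Int) 1).all (fun j => g (PySem.List.pyGetD xs j d)) = xs.all g := by
  calc (PySem.List.pyRange 0 (xs.length : Int) 1).all (fun j => g (PySem.List.pyGetD xs j d))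
      = ((PySem.List.pyRange 0 (xs.length : Int) 1).map (fun j => PySem.List.pyGetD xs j d)).all g := by
        rw [List.all_map]; rfl
    _ = xs.all g := by rw [PySem.List.map_pyGetD_pyRange_zero']

-- B's per-row validity: no cell fails the range test
def pvRowOk (row : List Int) : Bool := !(row.any pvBadCell)

-- once a predecessor exists, the chained pass is the conjunction 'every later row has its length and is ok'
lemma pvGoB_some (rows : List (List Int)) (p : List Int) :
    pvGoB rows (some p) = rows.all (fun r => decide (r.length = p.length) && pvRowOk r) := by
  induction rows generalizing p with
  | nil => rfl
  | cons row rest ih =>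
    have hstep : pvGoB (row :: rest) (some p)
        = (if decide (row.length ≠ p.length) = true then false
           else if row.any pvBadCell = true then false else pvGoB rest (some row)) := rfl
    rw [hstep, List.all_cons]
    by_cases hl : row.length = p.length
    · rw [decide_eq_false (fun h => h hl), if_neg Bool.false_ne_true]
      cases hb : row.any pvBadCell with
      | true =>
        rw [if_pos rfl]
        have : pvRowOk row = false := by rw [pvRowOk, hb]; rfl
        rw [this]; simp
      | false =>
        rw [if_neg Bool.false_ne_true]
        have hok : pvRowOk row = true := by rw [pvRowOk, hb]; rfl
        rw [ih row, hok, hl, decide_eq_true rfl]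
        simp
    · rw [decide_eq_true hl, if_pos rfl, decide_eq_false hl]
      simp

-- the membership test and the range test agree on Int
lemma mem_iff_range (c : Int) :
    decide (c ∈ ([0, 1, 2, 3] : List Int)) = decide (0 ≤ c ∧ c ≤ 3) := by
  simp only [List.mem_cons, List.not_mem_nil, or_false, decide_eq_decide]
  omega

lemma rowOk_eq_memAll (r : List Int) :
    r.all (fun c => decide (c ∈ ([0, 1, 2, 3] : List Int))) = pvRowOk r := by
  rw [pvRowOk, List.all_eq_not_any_not]
  refine congrArg (fun f => !(r.any f)) (funext fun c => ?_)
  rw [mem_iff_range]; rfl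

theorem is_map_valid_eq (map : List (List Int)) : is_map_valid map = is_map_valid_alt map := by
  unfold is_map_valid is_map_valid_alt
  rw [all_pyRange_pyGetD map []
      (fun r => decide ((PySem.List.pyGetD map 0 []).length = r.length))]
  rw [all_pyRange_pyGetD map []
      (fun r => (PySem.List.pyRange 0 ((r : List Int).length : Int) 1).all (fun col =>
        decide (PySem.List.pyGetD r col 0 ∈ ([0, 1, 2, 3] : List Int))))]
  have hcells : (map.all (fun r => (PySem.List.pyRange 0 ((r : List Int).length : Int) 1).all
      (fun col => decide (PySem.List.pyGetD r col 0 ∈ ([0, 1, 2, 3] : List Int)))))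
      = map.all pvRowOk := by
    refine congrArg map.all (funext fun r => ?_)
    rw [all_pyRange_pyGetD r 0 (fun c => decide (c ∈ ([0, 1, 2, 3] : List Int)))]
    exact rowOk_eq_memAll r
  rw [hcells]
  cases map with
  | nil => rfl
  | cons h t =>
    have hB : pvGoB (h :: t) none
        = (if h.any pvBadCell = true then false else pvGoB t (some h)) := rfl
    rw [hB, PySem.List.pyGetD_zero_cons]
    cases hb : h.any pvBadCell with
    | true =>
      rw [if_pos rfl]
      have : pvRowOk h = false := by rw [pvRowOk, hb]; rfl
      simp [List.all_cons, this]
    | false =>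
      rw [if_neg Bool.false_ne_true, pvGoB_some]
      have hok : pvRowOk h = true := by rw [pvRowOk, hb]; rfl
      rw [List.all_cons, List.all_cons, hok, decide_eq_true (rfl : h.length = h.length)]
      rw [Bool.true_and, Bool.true_and, Bool.eq_iff_iff]
      simp only [Bool.and_eq_true, List.all_eq_true, Bool.and_eq_true, decide_eq_true_eq]
      constructor
      · rintro ⟨hl, hok'⟩ r hr
        exact ⟨(hl r hr).symm, hok' r hr⟩
      · intro hall
        exact ⟨fun r hr => ((hall r hr).1).symm, fun r hr => (hall r hr).2⟩

-- ===== VERDICT (by name: the statement is the Claim_ definition above) =====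
theorem is_map_valid_spec : Claim_equal_is_map_valid := by
  intro map _
  show is_map_valid map = is_map_valid_alt map
  exact is_map_valid_eq map
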